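-- pv_equiv track=rewrite | github.com/maccs-augsburg/spacedatapython | newGui/Model/station_names.py | find_full_name
-- ===== SOURCE A (Python) =====
-- names = (
--     # MACCS test locations
--     ( "AU", "AUG", "AUGS", "Augsburg College",  "Augsburg College, Minnesota, USA"),
--     ( "BU", "BOS", "BOST", "Boston University", "Boston University, Boston, USA"),
--     # MACCS stations
--     ( "CD", "CDR", "CDOR", "Cape Dorset",       "Cape Dorset, Nunavut, Canada"),
--     ( "CH", "CHB", "CHAR", "Coral Harbour",     "Coral Harbour, Nunavut, Canada"),
--     ( "CY", "CRV", "CYRV", "Clyde River",       "Clyde River, Nunavut, Canada"),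
--     ( "GH", "GJO", "GHAV", "Gjoa Haven",        "Gjoa Haven, Nunavut, Canada"),
--     ( "IG", "IGL", "IGLK", "Igloolik",          "Igloolik, Nunavut, Canada"),
--     ( "NA", "NAN", "NAIN", "Nain",              "Nain, Labrador, Canada"),
--     ( "PB", "PEB", "PBAY", "Pelly Bay",         "Pelly Bay, Nunavut, Canada"),
--     ( "PG", "PGG", "PGTG", "Pangnirtung",       "Pangnirtung, Nunavut, Canada"),
--     ( "RB", "RBY", "RBAY", "Repulse Bay",       "Repulse Bay, Nunavut, Canada"),
--     # Search Coil locations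
--     ( "MC", "MCM", "MCM-", "McMurdo",           "McMurdo Sound, Antarctica"),
--     ( "SP", "SPA", "SPA-", "South Pole",        "South Pole, Antarctica"),
--     ( "IQ", "IQA", "IQA-", "Iqaluit",           "Iqaluit, Nunavut, Canada"),
--     ( "SS", "SDY", "SDY-", "Sondrestrom",       "Sondrestrom, Greenland"),
--     ( "HB", "HAL", "HAL-", "Halley Bay",        "Halley Bay, Antarctica"))
--
-- def find_full_name( a_name) :
--     """
--     Finds the full name of a station given the two, three, or four letter name.
--
--     Parameters
--     ----------
--     a_name:
--         A two, three, or four letter station name.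
--
--     Returns
--     -------
--     string
--         The full name of the given station or an empty string if not found.
--     """
--     a_name = a_name.upper() # change the input to all upper case
--     column_index = 0        # assume the input is a two letter abbreviation
--     if len( a_name) == 3 :
--         column_index = 1    # the input string is a three letter abbreviation
--     elif len( a_name) == 4 :
--         column_index = 2
--     row_index = -1          # start with an illegal row number
--     for row in range(16) :  # 0 to 15, the row numbers of names array.
--         if names[row][column_index] == a_name :
--             row_index = row
--             break
--     if row_index < 0 :      # did not find a match
--         return ""           # FIXME: return nil?
--     else :
--         return names[row_index][3]  # 3 is the column of the full station name.
-- ===== SOURCE B (Python) =====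
-- # One flat precomputed table: abbreviation -> full station name.
-- _FULL_NAME = {
--     "AU"   : "Augsburg College",
--     "AUG"  : "Augsburg College",
--     "AUGS" : "Augsburg College",
--     "BU"   : "Boston University",
--     "BOS"  : "Boston University",
--     "BOST" : "Boston University",
--     "CD"   : "Cape Dorset",
--     "CDR"  : "Cape Dorset",
--     "CDOR" : "Cape Dorset",
--     "CH"   : "Coral Harbour",
--     "CHB"  : "Coral Harbour",
--     "CHAR" : "Coral Harbour",
--     "CY"   : "Clyde River",
--     "CRV"  : "Clyde River",
--     "CYRV" : "Clyde River",
--     "GH"   : "Gjoa Haven",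
--     "GJO"  : "Gjoa Haven",
--     "GHAV" : "Gjoa Haven",
--     "IG"   : "Igloolik",
--     "IGL"  : "Igloolik",
--     "IGLK" : "Igloolik",
--     "NA"   : "Nain",
--     "NAN"  : "Nain",
--     "NAIN" : "Nain",
--     "PB"   : "Pelly Bay",
--     "PEB"  : "Pelly Bay",
--     "PBAY" : "Pelly Bay",
--     "PG"   : "Pangnirtung",
--     "PGG"  : "Pangnirtung",
--     "PGTG" : "Pangnirtung",
--     "RB"   : "Repulse Bay",
--     "RBY"  : "Repulse Bay",
--     "RBAY" : "Repulse Bay",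
--     "MC"   : "McMurdo",
--     "MCM"  : "McMurdo",
--     "MCM-" : "McMurdo",
--     "SP"   : "South Pole",
--     "SPA"  : "South Pole",
--     "SPA-" : "South Pole",
--     "IQ"   : "Iqaluit",
--     "IQA"  : "Iqaluit",
--     "IQA-" : "Iqaluit",
--     "SS"   : "Sondrestrom",
--     "SDY"  : "Sondrestrom",
--     "SDY-" : "Sondrestrom",
--     "HB"   : "Halley Bay",
--     "HAL"  : "Halley Bay",
--     "HAL-" : "Halley Bay",
-- }
--
-- def find_full_name( a_name) :
--     """Finds the full name of a station given the two, three, or four letter name."""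
--     return _FULL_NAME.get(a_name.upper(), "")
-- ===== Notes on version B (the rewrite author's own statement) =====
-- stated objective: idiomatic
-- what changed: Replaces the length-to-column computation and the indexed 16-row linear scan with one flat module-level dict literal mapping every abbreviation directly to its full name, so the function is a single dict .get lookup with an empty-string default.
import Mathlib
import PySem

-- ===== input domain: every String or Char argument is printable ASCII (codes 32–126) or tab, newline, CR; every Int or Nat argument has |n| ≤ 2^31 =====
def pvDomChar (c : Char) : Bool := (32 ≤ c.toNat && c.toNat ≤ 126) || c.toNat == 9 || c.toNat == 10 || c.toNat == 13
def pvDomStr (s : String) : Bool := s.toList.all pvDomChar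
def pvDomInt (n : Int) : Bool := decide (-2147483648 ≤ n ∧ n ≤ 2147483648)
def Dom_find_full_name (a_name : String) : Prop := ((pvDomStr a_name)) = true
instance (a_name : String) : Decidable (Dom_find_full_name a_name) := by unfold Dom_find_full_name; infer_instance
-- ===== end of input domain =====

-- B replaces A's length→column computation plus indexed 16-row scan by one flat
-- precomputed abbreviation→full-name dictionary literal looked up with default ""
-- (objective: idiomatic).

-- ===== PORT A =====
-- the module-level `names` table (tuples of 5 strings → products)
def pvNames : List (String × String × String × String × String) :=
  [ ("AU", "AUG", "AUGS", "Augsburg College",  "Augsburg College, Minnesota, USA"),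
    ("BU", "BOS", "BOST", "Boston University", "Boston University, Boston, USA"),
    ("CD", "CDR", "CDOR", "Cape Dorset",       "Cape Dorset, Nunavut, Canada"),
    ("CH", "CHB", "CHAR", "Coral Harbour",     "Coral Harbour, Nunavut, Canada"),
    ("CY", "CRV", "CYRV", "Clyde River",       "Clyde River, Nunavut, Canada"),
    ("GH", "GJO", "GHAV", "Gjoa Haven",        "Gjoa Haven, Nunavut, Canada"),
    ("IG", "IGL", "IGLK", "Igloolik",          "Igloolik, Nunavut, Canada"),
    ("NA", "NAN", "NAIN", "Nain",              "Nain, Labrador, Canada"),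
    ("PB", "PEB", "PBAY", "Pelly Bay",         "Pelly Bay, Nunavut, Canada"),
    ("PG", "PGG", "PGTG", "Pangnirtung",       "Pangnirtung, Nunavut, Canada"),
    ("RB", "RBY", "RBAY", "Repulse Bay",       "Repulse Bay, Nunavut, Canada"),
    ("MC", "MCM", "MCM-", "McMurdo",           "McMurdo Sound, Antarctica"),
    ("SP", "SPA", "SPA-", "South Pole",        "South Pole, Antarctica"),
    ("IQ", "IQA", "IQA-", "Iqaluit",           "Iqaluit, Nunavut, Canada"),
    ("SS", "SDY", "SDY-", "Sondrestrom",       "Sondrestrom, Greenland"),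
    ("HB", "HAL", "HAL-", "Halley Bay",        "Halley Bay, Antarctica") ]

-- names[row][i] for a row tuple (i is always a literal 0..4 here)
def pvCol (r : String × String × String × String × String) (i : Nat) : String :=
  match i with
  | 0 => r.1 | 1 => r.2.1 | 2 => r.2.2.1 | 3 => r.2.2.2.1 | _ => r.2.2.2.2

-- A's `for row in range(16): … break` loop; names[row] is always in range
-- (row ∈ 0..15, |names| = 16), so the .getD dummy is never used.
def pvFindRow (u : String) (ci : Nat) : List Int → Int
  | [] => -1
  | r :: rs =>
      if pvCol ((PySem.List.pyGet? pvNames r).getD ("", "", "", "", "")) ci = u then r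
      else pvFindRow u ci rs

def find_full_name (a_name : String) : String :=
  let u := PySem.Str.upper a_name
  let column_index : Nat :=
    if PySem.Str.len u = 3 then 1 else if PySem.Str.len u = 4 then 2 else 0
  let row_index := pvFindRow u column_index (PySem.List.pyRange 0 16 1)
  if row_index < 0 then ""
  else pvCol ((PySem.List.pyGet? pvNames row_index).getD ("", "", "", "", "")) 3

-- ===== PORT B =====
-- Source B's module-level dict literal _FULL_NAME (48 distinct keys, insertion order)
def pvFullName : PySem.Dict String String := PySem.Dict.mk
[  ("AU", "Augsburg College"),
  ("AUG", "Augsburg College"),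
  ("AUGS", "Augsburg College"),
  ("BU", "Boston University"),
  ("BOS", "Boston University"),
  ("BOST", "Boston University"),
  ("CD", "Cape Dorset"),
  ("CDR", "Cape Dorset"),
  ("CDOR", "Cape Dorset"),
  ("CH", "Coral Harbour"),
  ("CHB", "Coral Harbour"),
  ("CHAR", "Coral Harbour"),
  ("CY", "Clyde River"),
  ("CRV", "Clyde River"),
  ("CYRV", "Clyde River"),
  ("GH", "Gjoa Haven"),
  ("GJO", "Gjoa Haven"),
  ("GHAV", "Gjoa Haven"),
  ("IG", "Igloolik"),
  ("IGL", "Igloolik"),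
  ("IGLK", "Igloolik"),
  ("NA", "Nain"),
  ("NAN", "Nain"),
  ("NAIN", "Nain"),
  ("PB", "Pelly Bay"),
  ("PEB", "Pelly Bay"),
  ("PBAY", "Pelly Bay"),
  ("PG", "Pangnirtung"),
  ("PGG", "Pangnirtung"),
  ("PGTG", "Pangnirtung"),
  ("RB", "Repulse Bay"),
  ("RBY", "Repulse Bay"),
  ("RBAY", "Repulse Bay"),
  ("MC", "McMurdo"),
  ("MCM", "McMurdo"),
  ("MCM-", "McMurdo"),
  ("SP", "South Pole"),
  ("SPA", "South Pole"),
  ("SPA-", "South Pole"),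
  ("IQ", "Iqaluit"),
  ("IQA", "Iqaluit"),
  ("IQA-", "Iqaluit"),
  ("SS", "Sondrestrom"),
  ("SDY", "Sondrestrom"),
  ("SDY-", "Sondrestrom"),
  ("HB", "Halley Bay"),
  ("HAL", "Halley Bay"),
  ("HAL-", "Halley Bay")]

def find_full_name_alt (a_name : String) : String :=
  PySem.Dict.getD pvFullName (PySem.Str.upper a_name) ""

-- ===== PRECONDITION & SPEC =====
def Spec_find_full_name (a_name : String) (out : String) : Prop := out = find_full_name_alt a_name
instance (a_name : String) (out : String) : Decidable (Spec_find_full_name a_name out) := by unfold Spec_find_full_name; infer_instance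

-- ===== CLAIM =====
def Claim_equal_find_full_name : Prop := ∀ (a_name : String), Dom_find_full_name a_name → Spec_find_full_name a_name (find_full_name a_name)

-- ===== LEMMAS AND PROOFS =====

-- all 48 abbreviations, in the dictionary's key order
def pvAllKeys : List String := ["AU", "AUG", "AUGS", "BU", "BOS", "BOST", "CD", "CDR", "CDOR", "CH", "CHB", "CHAR", "CY", "CRV", "CYRV", "GH", "GJO", "GHAV", "IG", "IGL", "IGLK", "NA", "NAN", "NAIN", "PB", "PEB", "PBAY", "PG", "PGG", "PGTG", "RB", "RBY", "RBAY", "MC", "MCM", "MCM-", "SP", "SPA", "SPA-", "IQ", "IQA", "IQA-", "SS", "SDY", "SDY-", "HB", "HAL", "HAL-"]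

-- core fact: for every upper-cased input u the two computations agree
set_option maxRecDepth 8192 in
set_option maxHeartbeats 2000000 in
theorem pv_core (u : String) :
    (let column_index : Nat :=
       if PySem.Str.len u = 3 then 1 else if PySem.Str.len u = 4 then 2 else 0
     let row_index := pvFindRow u column_index (PySem.List.pyRange 0 16 1)
     if row_index < 0 then ""
     else pvCol ((PySem.List.pyGet? pvNames row_index).getD ("", "", "", "", "")) 3)
    = PySem.Dict.getD pvFullName u "" := by
  by_cases hu : u ∈ pvAllKeys
  · fin_cases hu <;> decide
  · have hnone : PySem.Dict.get? pvFullName u = none := by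
      rw [PySem.Dict.get?_eq_none_iff_not_mem_keys]
      simpa [pvFullName, PySem.Dict.keys, pvAllKeys] using hu
    have hB : PySem.Dict.getD pvFullName u "" = "" := by
      rw [PySem.Dict.getD_eq_get?_getD, hnone]; rfl
    simp only [pvAllKeys, List.mem_cons, List.not_mem_nil, or_false, not_or] at hu
    obtain ⟨h1, h2, h3, h4, h5, h6, h7, h8, h9, h10, h11, h12, h13, h14, h15, h16, h17, h18, h19, h20, h21, h22, h23, h24, h25, h26, h27, h28, h29, h30, h31, h32, h33, h34, h35, h36, h37, h38, h39, h40, h41, h42, h43, h44, h45, h46, h47, h48⟩ := hu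
    rw [hB]
    have hrange : PySem.List.pyRange 0 16 1 =
        [0, 1, 2, 3, 4, 5, 6, 7, 8, 9, 10, 11, 12, 13, 14, 15] := by decide
    split_ifs with hl3 hl4 <;>
      simp [hrange, pvFindRow, pvNames, pvCol, PySem.List.pyGet?, PySem.List.pyIdx?,
        Ne.symm h1, Ne.symm h2, Ne.symm h3, Ne.symm h4, Ne.symm h5, Ne.symm h6, Ne.symm h7, Ne.symm h8, Ne.symm h9, Ne.symm h10, Ne.symm h11, Ne.symm h12, Ne.symm h13, Ne.symm h14, Ne.symm h15, Ne.symm h16, Ne.symm h17, Ne.symm h18, Ne.symm h19, Ne.symm h20, Ne.symm h21, Ne.symm h22, Ne.symm h23, Ne.symm h24, Ne.symm h25, Ne.symm h26, Ne.symm h27, Ne.symm h28, Ne.symm h29, Ne.symm h30, Ne.symm h31, Ne.symm h32, Ne.symm h33, Ne.symm h34, Ne.symm h35, Ne.symm h36, Ne.symm h37, Ne.symm h38, Ne.symm h39, Ne.symm h40, Ne.symm h41, Ne.symm h42, Ne.symm h43, Ne.symm h44, Ne.symm h45, Ne.symm h46, Ne.symm h47, Ne.symm h48]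

-- ===== VERDICT =====
theorem find_full_name_spec : Claim_equal_find_full_name := by
  intro a_name _
  show find_full_name a_name = find_full_name_alt a_name
  unfold find_full_name find_full_name_alt
  exact pv_core (PySem.Str.upper a_name)
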